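-- pv_equiv track=rewrite | github.com/tae-hyunkim/personal_study | 코테공부/23년/Days51.py | solution
-- ===== SOURCE A (Python) =====
-- def solution(want, number, discount):
--
--     answer = 0
--     N = len(discount)
--     disc_i = 0
--
--     while disc_i + 10 <= N:
--
--         avail_disc = discount[disc_i:disc_i+10]
--
--         if all(num == avail_disc.count(product) for product, num in zip(want, number)):
--             answer += 1
--
--         disc_i += 1
--
--     return answer
-- ===== SOURCE B (Python) =====
-- def solution(want, number, discount):
--     N = len(discount)
--     cnt = {}
--     for d in discount[:10]:
--         cnt[d] = cnt.get(d, 0) + 1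
--     answer = 0
--     for i in range(N - 9):
--         if all(cnt.get(p, 0) == num for p, num in zip(want, number)):
--             answer += 1
--         if i + 10 < N:
--             out = discount[i]
--             cnt[out] = cnt.get(out, 0) - 1
--             new = discount[i + 10]
--             cnt[new] = cnt.get(new, 0) + 1
--     return answer
-- ===== Notes on version B (the rewrite author's own statement) =====
-- stated objective: alternative
-- what changed: replaces A's per-window slice + repeated list.count scans with a sliding-window dict of counts updated in O(1) per shift, checked against the wanted numbers
import Mathlib
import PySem

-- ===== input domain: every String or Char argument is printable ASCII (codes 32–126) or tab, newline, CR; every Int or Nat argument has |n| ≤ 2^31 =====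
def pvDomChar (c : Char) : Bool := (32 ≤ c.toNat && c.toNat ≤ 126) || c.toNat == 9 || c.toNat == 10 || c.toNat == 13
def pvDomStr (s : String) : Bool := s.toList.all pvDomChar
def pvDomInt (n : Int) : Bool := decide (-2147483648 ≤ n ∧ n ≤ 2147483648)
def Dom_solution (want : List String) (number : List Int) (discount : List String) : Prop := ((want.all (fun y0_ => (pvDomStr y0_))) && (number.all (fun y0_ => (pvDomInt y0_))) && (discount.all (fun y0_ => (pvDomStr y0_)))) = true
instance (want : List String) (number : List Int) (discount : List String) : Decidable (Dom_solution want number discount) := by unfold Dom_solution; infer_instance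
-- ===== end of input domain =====

-- B replaces A's per-window slice + repeated list.count scans with a sliding-window
-- dict of counts updated in O(1) per shift (alternative algorithm).

-- ===== PORT A =====
-- literal port of A's while-loop (slice each window, count each wanted product in it)
def solutionLoop (want : List String) (number : List Int) (discount : List String)
    (N disc_i answer : Int) : Int :=
  if _h : disc_i + 10 ≤ N then
    let avail := PySem.List.slice discount (some disc_i) (some (disc_i + 10))
    let answer' := if (want.zip number).all (fun pn => pn.2 == ((avail.count pn.1 : Nat) : Int))
                   then answer + 1 else answer
    solutionLoop want number discount N (disc_i + 1) answer'
  else answer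
termination_by (N - disc_i).toNat
decreasing_by omega

def solution (want : List String) (number : List Int) (discount : List String) : Int :=
  solutionLoop want number discount (discount.length : Int) 0 0

-- ===== PORT B =====
-- counts of the first window: for d in discount[:10]: cnt[d] = cnt.get(d, 0) + 1
def initCnt (discount : List String) : PySem.Dict String Int :=
  (PySem.List.slice discount none (some 10)).foldl
    (fun cnt d => cnt.insert d (cnt.getD d 0 + 1)) PySem.Dict.empty

-- body of B's for-loop: check the current window, then slide the dict one step
def stepB (want : List String) (number : List Int) (discount : List String) (N : Int)
    (st : PySem.Dict String Int × Int) (i : Int) : PySem.Dict String Int × Int :=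
  let cnt := st.1
  let answer := if (want.zip number).all (fun pn => cnt.getD pn.1 0 == pn.2)
                then st.2 + 1 else st.2
  if i + 10 < N then
    let out := PySem.List.pyGetD discount i ""
    let cnt := cnt.insert out (cnt.getD out 0 - 1)
    let new := PySem.List.pyGetD discount (i + 10) ""
    let cnt := cnt.insert new (cnt.getD new 0 + 1)
    (cnt, answer)
  else (cnt, answer)

def solution_alt (want : List String) (number : List Int) (discount : List String) : Int :=
  let N : Int := (discount.length : Int)
  ((PySem.List.pyRange 0 (N - 9) 1).foldl (stepB want number discount N) (initCnt discount, 0)).2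

-- ===== PRECONDITION & SPEC =====
def Spec_solution (want : List String) (number : List Int) (discount : List String) (out : Int) : Prop := out = solution_alt want number discount
instance (want : List String) (number : List Int) (discount : List String) (out : Int) : Decidable (Spec_solution want number discount out) := by unfold Spec_solution; infer_instance

-- ===== CLAIM (what is proved, stated in full; the proofs are below) =====
def Claim_equal_solution : Prop := ∀ (want : List String) (number : List Int) (discount : List String), Dom_solution want number discount → Spec_solution want number discount (solution want number discount)

-- ===== LEMMAS AND PROOFS =====

-- A's window slice is drop-then-take
lemma slice_window (xs : List String) (a : Nat) :
    PySem.List.slice xs (some (a : Int)) (some ((a : Int) + 10)) = (xs.drop a).take 10 := by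
  simpa using PySem.List.slice_natCast_add xs a 10

-- the two window checks agree when cnt holds the window's counts
lemma check_eq (want : List String) (number : List Int) (xs : List String) (a : Nat)
    (cnt : PySem.Dict String Int)
    (hcnt : ∀ p, cnt.getD p 0 = (((xs.drop a).take 10).count p : Int)) :
    ((want.zip number).all (fun pn => cnt.getD pn.1 0 == pn.2))
    = ((want.zip number).all (fun pn =>
        pn.2 == (((PySem.List.slice xs (some (a : Int)) (some ((a : Int) + 10))).count pn.1 : Nat) : Int))) := by
  apply List.all_congr rfl
  intro pn
  rw [slice_window, hcnt pn.1, Bool.beq_comm]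

-- counter of the first window
lemma initCnt_getD (xs : List String) (p : String) :
    (initCnt xs).getD p 0 = (((xs.drop 0).take 10).count p : Int) := by
  unfold initCnt
  rw [PySem.List.slice_to xs (by omega : (0:Int) ≤ 10)]
  rw [PySem.Dict.getD_foldl_insert_add_one]
  simp

-- sliding the counter one step keeps the window invariant
lemma slide_inv (xs : List String) (a : Nat) (cnt : PySem.Dict String Int)
    (hcnt : ∀ p, cnt.getD p 0 = (((xs.drop a).take 10).count p : Int))
    (h10 : a + 10 < xs.length) (p : String) :
    (((cnt.insert (PySem.List.pyGetD xs (a : Int) "")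
        (cnt.getD (PySem.List.pyGetD xs (a : Int) "") 0 - 1)).insert
          (PySem.List.pyGetD xs ((a : Int) + 10) "")
          ((cnt.insert (PySem.List.pyGetD xs (a : Int) "")
            (cnt.getD (PySem.List.pyGetD xs (a : Int) "") 0 - 1)).getD
              (PySem.List.pyGetD xs ((a : Int) + 10) "") 0 + 1)).getD p 0)
    = (((xs.drop (a + 1)).take 10).count p : Int) := by
  have ha : a < xs.length := by omega
  have hout : PySem.List.pyGetD xs (a : Int) "" = xs[a] := by
    rw [PySem.List.pyGetD_eq_getElem _ _ (by omega) (by simpa using ha)]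
    simp
  have hnew : PySem.List.pyGetD xs ((a : Int) + 10) "" = xs[a + 10] := by
    rw [PySem.List.pyGetD_eq_getElem _ _ (by omega) (by omega)]
    simp only [show (((a : Int) + 10)).toNat = a + 10 from by omega]
  -- window a  = xs[a] :: mid,  window (a+1) = mid ++ [xs[a+10]]
  have ewin : (xs.drop a).take 10 = xs[a] :: (xs.drop (a + 1)).take 9 := by
    rw [List.drop_eq_getElem_cons ha]
    rfl
  have ewin' : (xs.drop (a + 1)).take 10 = (xs.drop (a + 1)).take 9 ++ [xs[a + 10]] := by
    have t := List.take_add_one (l := xs.drop (a + 1)) (i := 9)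
    norm_num at t
    rw [t]
    congr 1
    simp [show a + 1 + 9 = a + 10 from by omega, List.getElem?_eq_getElem h10]
  rw [hout, hnew, PySem.Dict.getD_insert, PySem.Dict.getD_insert, PySem.Dict.getD_insert]
  simp only [hcnt, ewin, ewin', List.count_append, List.count_cons, beq_iff_eq]
  by_cases h1 : p = xs[a + 10] <;> by_cases h2 : p = xs[a] <;>
    by_cases h3 : xs[a + 10] = xs[a] <;>
      simp_all [eq_comm]

-- B's fold over the window starts computes the same tally as A's slice-and-count fold
lemma altLoop (want : List String) (number : List Int) (xs : List String) :
    ∀ (n : Nat) (a : Nat) (cnt : PySem.Dict String Int) (answer : Int),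
    (((xs.length : Int) - 9) - (a : Int)).toNat = n →
    (∀ p, cnt.getD p 0 = (((xs.drop a).take 10).count p : Int)) →
    ((PySem.List.pyRange (a : Int) ((xs.length : Int) - 9) 1).foldl
        (stepB want number xs (xs.length : Int)) (cnt, answer)).2
    = (PySem.List.pyRange (a : Int) ((xs.length : Int) - 9) 1).foldl
        (fun ans i =>
          if (want.zip number).all (fun pn =>
              pn.2 == (((PySem.List.slice xs (some i) (some (i + 10))).count pn.1 : Nat) : Int))
          then ans + 1 else ans) answer := by
  intro n
  induction n using Nat.strong_induction_on with
  | _ n ih =>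
    intro a cnt answer hn hcnt
    by_cases h : (a : Int) < (xs.length : Int) - 9
    · rw [PySem.List.pyRange_one_cons h, List.foldl_cons, List.foldl_cons]
      rw [show ((a : Int) + 1) = ((a + 1 : Nat) : Int) from by push_cast; ring]
      unfold stepB
      simp only []
      rw [check_eq want number xs a cnt hcnt]
      by_cases h10 : (a : Int) + 10 < (xs.length : Int)
      · rw [if_pos h10]
        exact ih (((xs.length : Int) - 9) - ((a : Nat) + 1 : Nat)).toNat (by omega)
          (a + 1) _ _ rfl
          (fun p => slide_inv xs a cnt hcnt (by omega) p)
      · rw [if_neg h10]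
        have hnil : PySem.List.pyRange ((a + 1 : Nat) : Int) ((xs.length : Int) - 9) 1 = [] :=
          PySem.List.pyRange_one_eq_nil (by push_cast; omega)
        rw [hnil]
        rfl
    · rw [PySem.List.pyRange_one_eq_nil (by omega)]
      rfl

-- A's while loop as a fold over the window starts
lemma loop_eq (want : List String) (number : List Int) (xs : List String) (N : Int) :
    ∀ (n : Nat) (disc_i answer : Int), (N - disc_i).toNat = n →
    solutionLoop want number xs N disc_i answer
      = (PySem.List.pyRange disc_i (N - 9) 1).foldl
          (fun ans i =>
            if (want.zip number).all (fun pn =>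
                pn.2 == (((PySem.List.slice xs (some i) (some (i + 10))).count pn.1 : Nat) : Int))
            then ans + 1 else ans) answer := by
  intro n
  induction n using Nat.strong_induction_on with
  | _ n ih =>
    intro disc_i answer hn
    rw [solutionLoop]
    by_cases h : disc_i + 10 ≤ N
    · rw [dif_pos h]
      rw [PySem.List.pyRange_one_cons (by omega)]
      rw [List.foldl_cons]
      exact ih (N - (disc_i + 1)).toNat (by omega) (disc_i + 1) _ rfl
    · rw [dif_neg h]
      rw [PySem.List.pyRange_one_eq_nil (by omega)]
      rfl

-- ===== VERDICT (by name: the statement is the Claim_ definition above) =====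
theorem solution_spec : Claim_equal_solution := by
  intro want number discount _
  unfold Spec_solution solution solution_alt
  rw [loop_eq want number discount (discount.length : Int) (discount.length : Int).toNat 0 0 (by omega)]
  have := altLoop want number discount ((discount.length : Int) - 9).toNat 0 (initCnt discount) 0
    (by omega) (fun p => initCnt_getD discount p)
  simpa using this.symm
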